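-- pv_equiv track=rewrite | github.com/runtimeguard/runtime-guard | src/script_sentinel.py | _first_script_arg
-- ===== SOURCE A (Python) =====
-- def _first_script_arg(tokens: list[str]) -> str:
--     for idx, token in enumerate(tokens[1:], start=1):
--         if token == "-c":
--             return ""
--         if token.startswith("-"):
--             continue
--         if idx > 1 and tokens[idx - 1] in {"-m"}:
--             continue
--         return token
--     return ""
-- ===== SOURCE B (Python) =====
-- def _first_script_arg(tokens: list[str]) -> str:
--     body = tokens[1:]
--     if "-c" in body:
--         body = body[:body.index("-c")]
--     candidates = [t for t, p in zip(body, [""] + body)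
--                   if not t.startswith("-") and p != "-m"]
--     return candidates[0] if candidates else ""
-- ===== Notes on version B (the rewrite author's own statement) =====
-- stated objective: alternative
-- what changed: Replaced A's single imperative early-return scan with backward tokens[idx-1] indexing by a staged declarative pipeline: truncate the token list at the first "-c", pair each token with its predecessor via zip against a shifted copy, filter the non-option tokens not preceded by "-m" with a comprehension, and return the head of the resulting candidate list.
import Mathlib
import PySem

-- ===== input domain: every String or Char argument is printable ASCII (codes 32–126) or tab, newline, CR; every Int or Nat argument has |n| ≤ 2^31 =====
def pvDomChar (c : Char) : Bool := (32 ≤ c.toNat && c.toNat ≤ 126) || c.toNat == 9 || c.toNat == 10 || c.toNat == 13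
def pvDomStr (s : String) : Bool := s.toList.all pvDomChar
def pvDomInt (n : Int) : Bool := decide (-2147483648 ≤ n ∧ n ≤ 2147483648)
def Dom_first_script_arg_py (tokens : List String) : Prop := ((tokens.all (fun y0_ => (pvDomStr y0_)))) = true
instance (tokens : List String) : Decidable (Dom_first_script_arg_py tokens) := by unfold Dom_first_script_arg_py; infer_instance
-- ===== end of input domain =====

-- B replaces A's imperative early-return scan (with backward tokens[idx-1] lookup) by a
-- declarative pipeline: truncate at the first "-c", zip each token with its predecessor,
-- filter candidates, take the head (objective: alternative; same O(n) cost).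

-- ===== PORT A =====
-- loop 'for idx, token in enumerate(tokens[1:], start=1)'
def firstAuxA (tokens : List String) : List (Int × String) → String
  | [] => ""
  | (idx, token) :: rest =>
    if token == "-c" then ""
    else if PySem.Str.startswith token "-" then firstAuxA tokens rest
    else if decide (idx > 1) && (PySem.Set.ofList ["-m"]).contains (PySem.List.pyGetD tokens (idx - 1) "") then
      firstAuxA tokens rest
    else token

def first_script_arg_py (tokens : List String) : String :=
  firstAuxA tokens (PySem.List.enumerate (PySem.List.slice tokens (some 1) none) 1)

-- ===== PORT B =====
-- body = tokens[1:]; if "-c" in body: body = body[:body.index("-c")]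
-- candidates = [t for t, p in zip(body, [""] + body) if not t.startswith("-") and p != "-m"]
-- return candidates[0] if candidates else ""
-- (body.index("-c") is guarded by the membership test, so index? is always some here;
--  '.getD 0' only reads the guaranteed value)
def first_script_arg_py_alt (tokens : List String) : String :=
  let body := PySem.List.slice tokens (some 1) none
  let body2 := if body.contains "-c" then
      PySem.List.slice body none (some (((PySem.List.index? body "-c").getD 0 : Nat) : Int))
    else body
  let candidates := ((body2.zip ("" :: body2)).filter
      (fun tp => !(PySem.Str.startswith tp.1 "-") && tp.2 != "-m")).map Prod.fst
  match candidates.head? with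
  | some t => t
  | none => ""

-- ===== PRECONDITION & SPEC =====
def Spec_first_script_arg_py (tokens : List String) (out : String) : Prop := out = first_script_arg_py_alt tokens
instance (tokens : List String) (out : String) : Decidable (Spec_first_script_arg_py tokens out) := by unfold Spec_first_script_arg_py; infer_instance

-- ===== CLAIM (what is proved, stated in full; the proofs are below) =====
def Claim_equal_first_script_arg_py : Prop := ∀ (tokens : List String), Dom_first_script_arg_py tokens → Spec_first_script_arg_py tokens (first_script_arg_py tokens)

-- ===== LEMMAS AND PROOFS =====

-- common reference semantics: prev-carrying scan over tokens[1:]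
def loopSpec : List String → String → String
  | [], _ => ""
  | token :: rest, prev =>
    if token == "-c" then ""
    else if !(PySem.Str.startswith token "-") && prev != "-m" then token
    else loopSpec rest token

lemma contains_m (token : String) :
    (PySem.Set.ofList ["-m"]).contains token = (token == "-m") := by
  have h : PySem.Set.ofList ["-m"] = ["-m"] := by decide
  rw [h]
  show (token == "-m" || List.contains [] token) = (token == "-m")
  rw [List.contains_nil, Bool.or_false]

lemma firstAux_key (tokens : List String) (suffix : List String) :
    ∀ (i : Nat) (prev : String), 1 ≤ i → suffix = tokens.drop i →
    ((decide ((i : Int) > 1) &&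
        (PySem.Set.ofList ["-m"]).contains (PySem.List.pyGetD tokens ((i : Int) - 1) ""))
      = (prev == "-m")) →
    firstAuxA tokens (PySem.List.enumerate suffix (i : Int)) = loopSpec suffix prev := by
  induction suffix with
  | nil =>
    intro i prev _ _ _
    rw [PySem.List.enumerate_nil]
    rfl
  | cons token rest ih =>
    intro i prev hi hs hp
    have htok : tokens[i]? = some token := by
      have := congrArg (fun l => l[0]?) hs
      simpa [List.getElem?_drop] using this.symm
    have hrest : rest = tokens.drop (i + 1) := by
      have := congrArg List.tail hs
      simpa [List.tail_drop] using this
    have hp' : ((decide ((((i : Nat) : Int) + 1) > 1) &&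
        (PySem.Set.ofList ["-m"]).contains (PySem.List.pyGetD tokens ((((i : Nat) : Int) + 1) - 1) ""))
        = (token == "-m")) := by
      have h1 : (((i : Nat) : Int) + 1) - 1 = ((i : Nat) : Int) := by ring
      have h2 : PySem.List.pyGetD tokens ((i : Nat) : Int) "" = token := by
        rw [PySem.List.pyGetD_natCast]
        simp [List.getD, htok]
      have h3 : decide ((((i : Nat) : Int) + 1) > 1) = true := by
        simp; omega
      rw [h1, h2, h3, contains_m, Bool.true_and]
    have ihnext := ih (i + 1) token (by omega) hrest (by push_cast; exact hp')
    push_cast at ihnext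
    rw [PySem.List.enumerate_cons]
    show firstAuxA tokens ((↑i, token) :: _) = loopSpec (token :: rest) prev
    rw [firstAuxA, loopSpec]
    by_cases hc : (token == "-c") = true
    · simp only [hc, if_true]
    · rw [Bool.not_eq_true] at hc
      by_cases hdash : PySem.Str.startswith token "-" = true
      · simp only [hc, hdash, Bool.not_true, Bool.false_and, Bool.false_eq_true, if_false, if_true]
        exact ihnext
      · rw [Bool.not_eq_true] at hdash
        by_cases hm : (prev == "-m") = true
        · simp only [hc, hdash, hp, hm, bne, Bool.not_false,
            Bool.false_eq_true, if_false, if_true]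
          exact ihnext
        · rw [Bool.not_eq_true] at hm
          simp only [hc, hdash, hp, hm, bne, Bool.not_false, Bool.true_and,
            Bool.false_eq_true, if_false, if_true]

-- A's port equals the reference scan
lemma portA_eq_loopSpec (tokens : List String) :
    first_script_arg_py tokens = loopSpec tokens.tail "" := by
  unfold first_script_arg_py
  rw [PySem.List.slice_from_one]
  have := firstAux_key tokens tokens.tail 1 "" (by omega) (by simp) (by simp)
  simpa using this

-- the truncation stage of B equals takeWhile (· != "-c")
lemma trunc_eq_takeWhile (body : List String) :
    (if body.contains "-c" then
        PySem.List.slice body none (some (((PySem.List.index? body "-c").getD 0 : Nat) : Int))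
      else body)
      = body.takeWhile (fun x => x != "-c") := by
  induction body with
  | nil => simp
  | cons x rest ih =>
    by_cases hx : x = "-c"
    · subst hx
      have hcont : (("-c" :: rest).contains "-c") = true := by simp
      rw [if_pos hcont, PySem.List.index?_cons_self, Option.getD_some,
        PySem.List.slice_to_natCast]
      simp
    · by_cases hc : rest.contains "-c" = true
      · have hmem : "-c" ∈ rest := by simpa using hc
        have hcont : ((x :: rest).contains "-c") = true := by
          simp only [List.contains_cons]
          simp [hmem]
        obtain ⟨k, hk⟩ : ∃ k, PySem.List.index? rest "-c" = some k :=
          Option.isSome_iff_exists.mp ((PySem.List.index?_isSome_iff rest "-c").2 hmem)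
        rw [if_pos hcont, PySem.List.index?_cons_of_ne rest hx, hk]
        simp only [Option.map_some, Option.getD_some]
        rw [PySem.List.slice_to_natCast, List.take_succ_cons]
        have ihl := ih
        rw [if_pos hc, hk, Option.getD_some, PySem.List.slice_to_natCast] at ihl
        simp [hx, ihl]
      · have hcont : ¬ (((x :: rest).contains "-c") = true) := by
          intro h
          have h' : "-c" = x ∨ "-c" ∈ rest := by simpa using h
          rcases h' with h1 | h2
          · exact hx h1.symm
          · have hnm : "-c" ∉ rest := by simpa using hc
            exact hnm h2
        rw [if_neg hcont]
        have ihl := ih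
        rw [if_neg hc] at ihl
        have hbne : ((fun y : String => y != "-c") x) = true := by simp [hx]
        rw [List.takeWhile_cons, if_pos hbne, ← ihl]

-- the pipeline over the truncated list equals the reference scan
lemma pipeline_eq_loopSpec (bs : List String) :
    ∀ (p : String),
      ((((bs.takeWhile (fun x => x != "-c")).zip (p :: bs.takeWhile (fun x => x != "-c"))).filter
          (fun tp => !(PySem.Str.startswith tp.1 "-") && tp.2 != "-m")).map Prod.fst).head?.getD ""
        = loopSpec bs p := by
  induction bs with
  | nil => intro p; rfl
  | cons t rest ih =>
    intro p
    rw [loopSpec]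
    by_cases hc : (t == "-c") = true
    · have ht : t = "-c" := by simpa using hc
      rw [if_pos hc]
      simp [ht]
    · rw [if_neg hc]
      have hne : ((fun x : String => x != "-c") t) = true := by simpa [bne] using hc
      rw [List.takeWhile_cons, if_pos hne, List.zip_cons_cons, List.filter_cons]
      by_cases hcond : (!(PySem.Str.startswith t "-") && p != "-m") = true
      · rw [if_pos (show ((fun tp : String × String =>
            !(PySem.Str.startswith tp.1 "-") && tp.2 != "-m") (t, p)) = true from hcond),
          if_pos hcond]
        rfl
      · rw [if_neg (show ¬ ((fun tp : String × String =>
            !(PySem.Str.startswith tp.1 "-") && tp.2 != "-m") (t, p)) = true from hcond),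
          if_neg hcond]
        exact ih t

-- ===== VERDICT (by name: the statement is the Claim_ definition above) =====
theorem first_script_arg_py_spec : Claim_equal_first_script_arg_py := by
  intro tokens _
  show first_script_arg_py tokens = first_script_arg_py_alt tokens
  rw [portA_eq_loopSpec]
  unfold first_script_arg_py_alt
  rw [PySem.List.slice_from_one]
  simp only [trunc_eq_takeWhile tokens.tail]
  have := pipeline_eq_loopSpec tokens.tail ""
  rw [← this]
  cases ((((tokens.tail.takeWhile (fun x => x != "-c")).zip
      ("" :: tokens.tail.takeWhile (fun x => x != "-c"))).filter
      (fun tp => !(PySem.Str.startswith tp.1 "-") && tp.2 != "-m")).map Prod.fst).head? <;>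
    rfl
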